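-- pv_equiv track=rewrite | github.com/ToxikSkrrt/COURS | Lycée/PasCoolLeCorona/TERMINALE/NSI/Ferreira/TP05_files/TP05_files_fonctions_corrige.py | taille
-- ===== SOURCE A (Python) =====
-- def creer_file():
--     """ Créé une file vide."""
--     return []
--
-- def est_vide(f):
--     """Renvoie True si la file est vide False sinon"""
--     return f == []
--
-- def enfile(f, x):
--     """Ajoute x à la file f"""
--     # insert() de Python n'est pas autorisé
--     f.append(x)
--
-- def defile(f):
--     """Supprime et renvoie le premier élément de la file f
--     - Échoue si la file est vide (renvoie une erreur).
--     """
--     return f.pop(0)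
--
-- def taille(f):
--     """ Calcule la hauteur n de la file f. """
--     # Ne pas utiliser len() de Python
--     n = 0
--     # On déplace les valeurs dans f vers f2 une autre pile
--     f2 = creer_file()
--     while not est_vide(f):
--         x = defile(f)
--         enfile(f2, x)
--         n += 1
--     # n = len(p) maintenant, on doit remettre la file
--     while not est_vide(f2):
--         x = defile(f2)
--         enfile(f, x)
--     return n
-- ===== SOURCE B (Python) =====
-- def taille(f):
--     """ Calcule la hauteur n de la file f. """
--     return len(f)
-- ===== Notes on version B (the rewrite author's own statement) =====
-- stated objective: simpler
-- what changed: Replaces the O(n^2) dequeue-into-a-second-queue-and-restore counting loops with the closed form len(f); no traversal or reconstruction at all.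
import Mathlib
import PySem

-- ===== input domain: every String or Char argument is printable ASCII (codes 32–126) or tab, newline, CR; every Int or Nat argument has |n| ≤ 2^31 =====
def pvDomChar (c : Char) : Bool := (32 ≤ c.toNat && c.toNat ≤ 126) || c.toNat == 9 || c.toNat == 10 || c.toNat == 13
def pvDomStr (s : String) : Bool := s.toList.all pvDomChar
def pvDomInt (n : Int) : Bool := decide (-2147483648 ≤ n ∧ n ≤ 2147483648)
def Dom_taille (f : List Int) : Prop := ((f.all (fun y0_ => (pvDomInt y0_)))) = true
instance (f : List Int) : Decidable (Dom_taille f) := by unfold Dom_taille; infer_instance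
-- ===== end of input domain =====

-- B replaces A's two move-and-count loops with the length builtin; A's in-place
-- mutation of f is a net identity (dequeue all, requeue all), return value only is claimed.
-- ===== PORT A =====
-- first while loop: move values from f to f2, counting
def tailleLoop1 : List Int → List Int → Int → Int × List Int
  | [], f2, n => (n, f2)
  | x :: f, f2, n => tailleLoop1 f (f2 ++ [x]) (n + 1)

-- second while loop: move values back from f2 to f
def tailleLoop2 : List Int → List Int → List Int
  | [], f => f
  | x :: f2, f => tailleLoop2 f2 (f ++ [x])

def taille (f : List Int) : Int :=
  let p := tailleLoop1 f [] 0
  let _f := tailleLoop2 p.2 []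
  p.1

-- ===== PORT B =====
def taille_alt (f : List Int) : Int := (f.length : Int)

-- ===== PRECONDITION & SPEC =====
def Spec_taille (f : List Int) (out : Int) : Prop := out = taille_alt f
instance (f : List Int) (out : Int) : Decidable (Spec_taille f out) := by unfold Spec_taille; infer_instance

-- ===== CLAIM (what is proved, stated in full; the proofs are below) =====
def Claim_equal_taille : Prop := ∀ (f : List Int), Dom_taille f → Spec_taille f (taille f)

-- ===== LEMMAS AND PROOFS =====

-- ===== VERDICT (by name: the statement is the Claim_ definition above) =====
theorem tailleLoop1_fst (f : List Int) : ∀ (f2 : List Int) (n : Int),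
    (tailleLoop1 f f2 n).1 = n + f.length := by
  induction f with
  | nil => intro f2 n; simp [tailleLoop1]
  | cons x t ih =>
      intro f2 n
      simp [tailleLoop1, ih]
      push_cast
      ring

theorem taille_spec : Claim_equal_taille := by
  intro f _
  unfold Spec_taille taille taille_alt
  simpa using tailleLoop1_fst f [] 0
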